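-- pv_equiv track=rewrite | github.com/sravani150602/langchain-job-hunter | backend/app/fetchers/jobright.py | extract_requirements_from_text
-- ===== SOURCE A (Python) =====
-- from typing import List, Optional
--
-- def extract_requirements_from_text(text: str) -> List[str]:
--     """Extract bullet-point requirements from job description text."""
--     requirements = []
--     lines = text.split('. ')
--     capture = False
--     for line in lines:
--         lower = line.lower()
--         if any(kw in lower for kw in ["qualifications", "requirements", "what you", "you have", "you bring"]):
--             capture = True
--         if capture and len(line) > 20 and len(line) < 200:
--             req = line.strip().lstrip('•·-* ')
--             if req:
--                 requirements.append(req)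
--         if len(requirements) >= 6:
--             break
--     return requirements[:6]
-- ===== SOURCE B (Python) =====
-- KWS = ("qualifications", "requirements", "what you", "you have", "you bring")
--
--
-- def _requirement_section(lines):
--     """Drop leading lines until the first one mentioning a keyword; [] if none."""
--     while lines and not any(kw in lines[0].lower() for kw in KWS):
--         lines = lines[1:]
--     return lines
--
--
-- def extract_requirements_from_text(text):
--     """Extract bullet-point requirements from job description text."""
--     out = []
--     for line in _requirement_section(text.split('. ')):
--         if 20 < len(line) < 200:
--             req = line.strip().lstrip('•·-* ')
--             if req:
--                 out.append(req)
--                 if len(out) == 6: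
--                     break
--     return out
-- ===== Notes on version B (the rewrite author's own statement) =====
-- stated objective: alternative
-- what changed: Replaced the single pass with a latched boolean flag by a two-phase decomposition: first find the section (the suffix of lines starting at the first keyword line), then a separate collecting pass with the length filter and 6-item cap.
import Mathlib
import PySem

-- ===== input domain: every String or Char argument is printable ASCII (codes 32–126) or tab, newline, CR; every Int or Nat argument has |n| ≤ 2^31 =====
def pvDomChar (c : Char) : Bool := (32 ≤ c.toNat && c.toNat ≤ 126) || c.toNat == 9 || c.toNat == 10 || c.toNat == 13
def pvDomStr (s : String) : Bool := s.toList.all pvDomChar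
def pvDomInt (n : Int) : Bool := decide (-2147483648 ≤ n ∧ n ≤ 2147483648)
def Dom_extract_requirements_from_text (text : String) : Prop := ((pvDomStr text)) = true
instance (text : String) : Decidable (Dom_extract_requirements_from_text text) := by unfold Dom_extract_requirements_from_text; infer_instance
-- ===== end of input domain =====

-- B replaces A's one-pass latched-flag one-pass scan by a 'find section, then collect' two-phase decomposition (objective: alternative).

-- shared literal pieces of both Pythons
-- text.split('. ') (sep nonempty, so Python's split is Chars.splitOn)
def pvLines (text : String) : List String :=
  (PySem.Chars.splitOn text.toList ". ".toList).map String.ofList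

def pvKws : List String := ["qualifications", "requirements", "what you", "you have", "you bring"]

-- line has any keyword in line.lower()
def pvHasKw (line : String) : Bool := pvKws.any (fun kw => PySem.Str.isIn kw (PySem.Str.lower line))

-- line.strip().lstrip('•·-* '): lstrip(chars) drops leading chars of the set — exact, ported by hand (no PySem lstrip-with-chars)
def pvClean (line : String) : String :=
  String.ofList ((PySem.Str.strip line).toList.dropWhile (fun c => c == '•' || c == '·' || c == '-' || c == '*' || c == ' '))

-- ===== PORT A =====
def pvLoopA : List String → Bool → List String → List String
  | [], _, reqs => reqs
  | line :: rest, capture, reqs =>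
    let capture := if pvHasKw line then true else capture
    let reqs :=
      if capture && decide (20 < PySem.Str.len line) && decide (PySem.Str.len line < 200) then
        (let req := pvClean line; if req ≠ "" then reqs ++ [req] else reqs)
      else reqs
    if 6 ≤ reqs.length then reqs else pvLoopA rest capture reqs

def extract_requirements_from_text (text : String) : List String :=
  PySem.List.slice (pvLoopA (pvLines text) false []) none (some 6)

-- ===== PORT B =====
def pvSection : List String → List String
  | [] => []
  | line :: rest => if pvHasKw line then line :: rest else pvSection rest

def pvCollect : List String → List String → List String
  | [], out => out
  | line :: rest, out =>
    if decide (20 < PySem.Str.len line) && decide (PySem.Str.len line < 200) then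
      let req := pvClean line
      if req ≠ "" then
        let out := out ++ [req]
        if out.length = 6 then out else pvCollect rest out
      else pvCollect rest out
    else pvCollect rest out

def extract_requirements_from_text_alt (text : String) : List String :=
  pvCollect (pvSection (pvLines text)) []

-- ===== PRECONDITION & SPEC =====
def Spec_extract_requirements_from_text (text : String) (out : List String) : Prop := out = extract_requirements_from_text_alt text
instance (text : String) (out : List String) : Decidable (Spec_extract_requirements_from_text text out) := by unfold Spec_extract_requirements_from_text; infer_instance

-- ===== CLAIM (what is proved, stated in full; the proofs are below) =====
def Claim_equal_extract_requirements_from_text : Prop := ∀ (text : String), Dom_extract_requirements_from_text text → Spec_extract_requirements_from_text text (extract_requirements_from_text text)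

-- ===== LEMMAS AND PROOFS =====

-- once capture is latched, A's remaining pass is B's collecting pass
theorem pvLoopA_true (lines : List String) : ∀ reqs : List String, reqs.length < 6 →
    pvLoopA lines true reqs = pvCollect lines reqs := by
  induction lines with
  | nil => intro reqs _; rfl
  | cons line rest ih =>
    intro reqs h
    simp only [pvLoopA, pvCollect, ite_self, Bool.true_and]
    by_cases hf : (decide (20 < PySem.Str.len line) && decide (PySem.Str.len line < 200)) = true
    · simp only [hf, if_true]
      by_cases hr : pvClean line ≠ ""
      · simp only [if_pos hr]
        have hlen : (reqs ++ [pvClean line]).length = reqs.length + 1 := by simp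
        by_cases h6 : (reqs ++ [pvClean line]).length = 6
        · simp [h6]
        · have : ¬ 6 ≤ (reqs ++ [pvClean line]).length := by omega
          simp only [if_neg this, if_neg h6]
          exact ih _ (by omega)
      · simp only [if_neg hr]
        have : ¬ 6 ≤ reqs.length := by omega
        simp only [if_neg this]
        exact ih _ h
    · simp only [if_neg hf]
      have : ¬ 6 ≤ reqs.length := by omega
      simp only [if_neg this]
      exact ih _ h

-- A from a cold start equals B's two phases
theorem pvLoopA_false (lines : List String) :
    pvLoopA lines false [] = pvCollect (pvSection lines) [] := by
  induction lines with
  | nil => rfl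
  | cons line rest ih =>
    by_cases hk : pvHasKw line = true
    · have : pvLoopA (line :: rest) false [] = pvLoopA (line :: rest) true [] := by
        simp only [pvLoopA, hk, if_true]
      rw [this, pvLoopA_true (line :: rest) [] (by simp), pvSection, if_pos hk]
    · simp only [pvLoopA, pvSection, hk]
      exact ih

-- the accumulator never exceeds 6
theorem pvLoopA_length (lines : List String) : ∀ (c : Bool) (reqs : List String),
    reqs.length < 6 → (pvLoopA lines c reqs).length ≤ 6 := by
  induction lines with
  | nil => intro c reqs h; simpa [pvLoopA] using Nat.le_of_lt h
  | cons line rest ih =>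
    intro c reqs h
    simp only [pvLoopA]
    set c' := if pvHasKw line then true else c with hc'
    by_cases hf : (c' && decide (20 < PySem.Str.len line) && decide (PySem.Str.len line < 200)) = true
    · simp only [hf, if_true]
      by_cases hr : pvClean line ≠ ""
      · simp only [if_pos hr]
        have hlen : (reqs ++ [pvClean line]).length = reqs.length + 1 := by simp
        by_cases h6 : 6 ≤ (reqs ++ [pvClean line]).length
        · simp only [if_pos h6]; omega
        · simp only [if_neg h6]; exact ih _ _ (by omega)
      · simp only [if_neg hr]
        have : ¬ 6 ≤ reqs.length := by omega
        simp only [if_neg this]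
        exact ih _ _ h
    · simp only [if_neg hf]
      have : ¬ 6 ≤ reqs.length := by omega
      simp only [if_neg this]
      exact ih _ _ h

-- ===== VERDICT (by name: the statement is the Claim_ definition above) =====
theorem extract_requirements_from_text_spec : Claim_equal_extract_requirements_from_text := by
  intro text _
  unfold Spec_extract_requirements_from_text extract_requirements_from_text extract_requirements_from_text_alt
  rw [PySem.List.slice_to _ (show (0:Int) ≤ 6 by norm_num), pvLoopA_false]
  have hlen := pvLoopA_length (pvLines text) false [] (by simp)
  rw [pvLoopA_false] at hlen
  exact List.take_of_length_le (by simpa using hlen)
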